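-- pv_equiv track=rewrite | github.com/KTV02/Studium | Ordnungsrechener.py | kRechnen
-- ===== SOURCE A (Python) =====
-- def ggt(a, b):
--     while b != 0:
--         c = a % b
--         a, b = b, c
--     return a
--
-- def kRechnen(z, phi):
--     phiZahlen = []
--     kZahlen = []
--     for i in range(z):
--         if(ggt(i, z) == 1):
--             phiZahlen.append(i)
--     for i in range(phi):
--         if(phi%(i+1)==0):
--             kZahlen.append(i+1)
--     return phiZahlen, kZahlen
-- ===== SOURCE B (Python) =====
-- def ggt(a, b):
--     return a if b == 0 else ggt(b, a % b)
--
-- def kRechnen(z, phi):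
--     phiZahlen = [i for i in range(z) if ggt(i, z) == 1]
--     small = []
--     large = []
--     i = 1
--     while i * i <= phi:
--         if phi % i == 0:
--             small.append(i)
--             q = phi // i
--             if q != i:
--                 large.append(q)
--         i += 1
--     return phiZahlen, small + large[::-1]
-- ===== Notes on version B (the rewrite author's own statement) =====
-- stated objective: alternative
-- what changed: The divisor list is built by a sqrt(phi) paired-divisor scan (collect i and phi//i while i*i <= phi, small half ascending plus large half reversed) instead of testing every candidate 1..phi; the coprime list is a comprehension over a recursive gcd instead of an append loop over an iterative gcd.
import Mathlib
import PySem

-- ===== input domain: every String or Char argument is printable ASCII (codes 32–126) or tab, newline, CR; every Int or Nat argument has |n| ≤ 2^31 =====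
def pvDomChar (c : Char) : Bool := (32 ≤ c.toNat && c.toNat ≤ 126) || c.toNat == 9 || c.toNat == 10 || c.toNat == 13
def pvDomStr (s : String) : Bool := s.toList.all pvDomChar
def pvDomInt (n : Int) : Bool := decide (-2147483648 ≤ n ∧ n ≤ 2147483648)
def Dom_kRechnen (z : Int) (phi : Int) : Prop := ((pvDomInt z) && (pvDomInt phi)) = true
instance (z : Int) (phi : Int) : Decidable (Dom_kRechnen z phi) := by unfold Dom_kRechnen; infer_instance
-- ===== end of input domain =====

-- B builds the divisor list by a √phi paired-divisor scan instead of A's linear 1..phi scan, and the coprime list as a filter over a recursive gcd (objective: alternative algorithm).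

-- Python '%' keeps the divisor's sign and shrinks in absolute value; termination of both gcds.
theorem pvModAbsLt (a b : Int) (h : b ≠ 0) : (PySem.Int.mod a b).natAbs < b.natAbs := by
  rcases lt_or_gt_of_ne h with hb | hb
  · have := PySem.Int.mod_neg_bounds a hb
    omega
  · have h1 := PySem.Int.mod_nonneg a hb
    have h2 := PySem.Int.mod_lt a hb
    omega

-- ===== PORT A =====
-- A's ggt: 'while b != 0: c = a % b; a, b = b, c; return a' as structural recursion on the loop state.
def ggtA (a b : Int) : Int :=
  if h : b = 0 then a else ggtA b (PySem.Int.mod a b)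
termination_by b.natAbs
decreasing_by exact pvModAbsLt a b h

def kRechnen (z : Int) (phi : Int) : List Int × List Int :=
  let phiZahlen := (PySem.List.pyRange 0 z 1).foldl
    (fun acc i => if ggtA i z = 1 then acc ++ [i] else acc) []
  let kZahlen := (PySem.List.pyRange 0 phi 1).foldl
    (fun acc i => if PySem.Int.mod phi (i + 1) = 0 then acc ++ [i + 1] else acc) []
  (phiZahlen, kZahlen)

-- ===== PORT B =====
-- B's ggt: the one-line recursive gcd.
def ggtB (a b : Int) : Int :=
  if h : b = 0 then a else ggtB b (PySem.Int.mod a b)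
termination_by b.natAbs
decreasing_by exact pvModAbsLt a b h

-- B's 'while i*i <= phi: …' with state (i, small, large).
def divLoopB (phi i : Int) (small large : List Int) : List Int × List Int :=
  if h : i * i ≤ phi then
    if PySem.Int.mod phi i = 0 then
      if PySem.Int.floordiv phi i ≠ i then
        divLoopB phi (i + 1) (small ++ [i]) (large ++ [PySem.Int.floordiv phi i])
      else
        divLoopB phi (i + 1) (small ++ [i]) large
    else
      divLoopB phi (i + 1) small large
  else (small, large)
termination_by (phi + 1 - i).toNat
decreasing_by
  all_goals
    have hi : i ≤ phi := by nlinarith [mul_self_nonneg i, mul_self_nonneg (i - 1)]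
    omega

def kRechnen_alt (z : Int) (phi : Int) : List Int × List Int :=
  let phiZahlen := (PySem.List.pyRange 0 z 1).filter (fun i => ggtB i z == 1)
  let p := divLoopB phi 1 [] []
  -- 'small + large[::-1]': the [::-1] slice is List.reverse (PySem.List.slice?_none_none_neg_one)
  (phiZahlen, p.1 ++ p.2.reverse)

-- ===== PRECONDITION & SPEC =====
def Spec_kRechnen (z : Int) (phi : Int) (out : List Int × List Int) : Prop := out = kRechnen_alt z phi
instance (z : Int) (phi : Int) (out : List Int × List Int) : Decidable (Spec_kRechnen z phi out) := by unfold Spec_kRechnen; infer_instance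

-- ===== CLAIM (what is proved, stated in full; the proofs are below) =====
def Claim_equal_kRechnen : Prop := ∀ (z : Int) (phi : Int), Dom_kRechnen z phi → Spec_kRechnen z phi (kRechnen z phi)

-- ===== LEMMAS AND PROOFS =====

-- the two gcds compute the same value
theorem ggt_eq (a b : Int) : ggtA a b = ggtB a b := by
  induction a, b using ggtA.induct <;> rw [ggtA, ggtB] <;> split <;> simp_all

-- divisors of phi between i and phi//i, ascending: what B's loop from i still contributes
def pvDivP (phi d : Int) : Bool := PySem.Int.mod phi d == 0

def Dv (phi i : Int) : List Int :=
  (PySem.List.pyRange i (PySem.Int.floordiv phi i + 1) 1).filter (pvDivP phi)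

-- a divisor trapped between phi//(i+1) and phi//i has cofactor exactly i
theorem pvCofactor (phi i d : Int) (hi : 1 ≤ i) (hphi : 0 ≤ phi) (hd : d ∣ phi)
    (h1 : PySem.Int.floordiv phi (i + 1) < d) (h2 : d ≤ PySem.Int.floordiv phi i) :
    phi = d * i := by
  have hu' : 0 ≤ PySem.Int.floordiv phi (i + 1) := by
    rw [PySem.Int.floordiv_eq_ediv_of_pos (by omega)]
    exact Int.ediv_nonneg hphi (by omega)
  have hd0 : 0 < d := by omega
  rw [PySem.Int.floordiv_lt_iff_lt_mul (by omega : (0:Int) < i + 1)] at h1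
  have h2' : d * i ≤ phi := (PySem.Int.le_floordiv_iff_mul_le (by omega)).1 h2
  obtain ⟨e, he⟩ := hd
  subst he
  have hei : i ≤ e := le_of_mul_le_mul_left (by linarith) hd0
  have hei' : e < i + 1 := lt_of_mul_lt_mul_left (by linarith) (le_of_lt hd0)
  have : e = i := by omega
  rw [this]

theorem pvUle (phi i : Int) (hi : 1 ≤ i) (hphi : 0 ≤ phi) :
    PySem.Int.floordiv phi (i + 1) ≤ PySem.Int.floordiv phi i := by
  have hu' : 0 ≤ PySem.Int.floordiv phi (i + 1) := by
    rw [PySem.Int.floordiv_eq_ediv_of_pos (by omega)]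
    exact Int.ediv_nonneg hphi (by omega)
  have h1 : PySem.Int.floordiv phi (i + 1) * (i + 1) ≤ phi :=
    (PySem.Int.le_floordiv_iff_mul_le (by omega)).1 le_rfl
  rw [PySem.Int.le_floordiv_iff_mul_le (by omega)]
  nlinarith

theorem Dv_stop (phi i : Int) (hi : 0 < i) (h : phi < i * i) : Dv phi i = [] := by
  unfold Dv
  rw [PySem.List.pyRange_one_eq_nil]
  · rfl
  · have : PySem.Int.floordiv phi i < i := (PySem.Int.floordiv_lt_iff_lt_mul hi).2 h
    omega

theorem Dv_step_ndvd (phi i : Int) (hi : 1 ≤ i) (hsq : i * i ≤ phi) (hnd : ¬ i ∣ phi) :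
    Dv phi i = Dv phi (i + 1) := by
  have hphi : 0 ≤ phi := by nlinarith
  have hiu : i ≤ PySem.Int.floordiv phi i :=
    (PySem.Int.le_floordiv_iff_mul_le (by omega)).2 hsq
  have hnil : ∀ lo hi', PySem.Int.floordiv phi (i + 1) < lo →
      hi' ≤ PySem.Int.floordiv phi i + 1 →
      (PySem.List.pyRange lo hi' 1).filter (pvDivP phi) = [] := by
    intro lo hi' hlo hhi
    rw [List.filter_eq_nil_iff]
    intro d hdmem
    rw [PySem.List.mem_pyRange_one] at hdmem
    simp only [pvDivP, beq_iff_eq, PySem.Int.mod_eq_zero_iff_dvd]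
    intro hdvd
    have := pvCofactor phi i d hi hphi hdvd (by omega) (by omega)
    exact hnd ⟨d, by linarith⟩
  unfold Dv
  rw [PySem.List.pyRange_one_cons (by omega), List.filter_cons_of_neg]
  · by_cases hcase : i ≤ PySem.Int.floordiv phi (i + 1)
    · rw [PySem.List.pyRange_one_append (i + 1) (PySem.Int.floordiv phi (i + 1) + 1)
        (PySem.Int.floordiv phi i + 1) (by omega) (by have := pvUle phi i hi hphi; omega),
        List.filter_append, hnil _ _ (by omega) le_rfl, List.append_nil]
    · rw [hnil (i + 1) _ (by omega) le_rfl,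
        PySem.List.pyRange_one_eq_nil (by omega)]
      rfl
  · simp only [pvDivP, beq_iff_eq, PySem.Int.mod_eq_zero_iff_dvd]
    simpa using hnd

theorem Dv_step_dvd_ne (phi i : Int) (hi : 1 ≤ i) (hsq : i * i ≤ phi) (hdvd : i ∣ phi)
    (hne : PySem.Int.floordiv phi i ≠ i) :
    Dv phi i = i :: (Dv phi (i + 1) ++ [PySem.Int.floordiv phi i]) := by
  have hphi : 0 ≤ phi := by nlinarith
  obtain ⟨c, hc⟩ := hdvd
  have hq : PySem.Int.floordiv phi i = c := by
    rw [PySem.Int.floordiv_eq_ediv_of_pos (by omega), hc,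
      Int.mul_ediv_cancel_left c (by omega : i ≠ 0)]
  have hiq : i ≤ c := by
    have := (PySem.Int.le_floordiv_iff_mul_le (by omega : (0:Int) < i)).2 hsq
    omega
  have hqc : i + 1 ≤ c := by
    rcases lt_or_eq_of_le hiq with h | h
    · omega
    · exact absurd (by omega : PySem.Int.floordiv phi i = i) hne
  have hiu' : i ≤ PySem.Int.floordiv phi (i + 1) := by
    rw [PySem.Int.le_floordiv_iff_mul_le (by omega)]
    nlinarith
  have hu'q : PySem.Int.floordiv phi (i + 1) < c := by
    rw [PySem.Int.floordiv_lt_iff_lt_mul (by omega)]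
    nlinarith
  have hnil : (PySem.List.pyRange (PySem.Int.floordiv phi (i + 1) + 1) c 1).filter
      (pvDivP phi) = [] := by
    rw [List.filter_eq_nil_iff]
    intro d hdmem
    rw [PySem.List.mem_pyRange_one] at hdmem
    simp only [pvDivP, beq_iff_eq, PySem.Int.mod_eq_zero_iff_dvd]
    intro hdvd'
    have := pvCofactor phi i d hi hphi hdvd' (by omega) (by omega)
    nlinarith
  have hlast : (PySem.List.pyRange (PySem.Int.floordiv phi (i + 1) + 1) (c + 1) 1).filter
      (pvDivP phi) = [c] := by
    have hpc : pvDivP phi c = true := by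
      simp only [pvDivP, beq_iff_eq]
      exact (PySem.Int.mod_eq_zero_iff_dvd phi c).2 ⟨i, by rw [hc, mul_comm]⟩
    rw [PySem.List.pyRange_one_succ_right (by omega), List.filter_append, hnil,
      List.nil_append, List.filter_cons_of_pos hpc, List.filter_nil]
  unfold Dv
  rw [hq, PySem.List.pyRange_one_cons (by omega), List.filter_cons_of_pos]
  · rw [PySem.List.pyRange_one_append (i + 1) (PySem.Int.floordiv phi (i + 1) + 1)
      (c + 1) (by omega) (by omega), List.filter_append, hlast]
  · simp only [pvDivP, beq_iff_eq]
    exact (PySem.Int.mod_eq_zero_iff_dvd phi i).2 ⟨c, hc⟩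

theorem Dv_step_dvd_eq (phi i : Int) (hi : 1 ≤ i) (hsq : i * i ≤ phi) (hdvd : i ∣ phi)
    (heq : PySem.Int.floordiv phi i = i) :
    Dv phi i = [i] ∧ Dv phi (i + 1) = [] := by
  have hphi : 0 ≤ phi := by nlinarith
  obtain ⟨c, hc⟩ := hdvd
  have hq : PySem.Int.floordiv phi i = c := by
    rw [PySem.Int.floordiv_eq_ediv_of_pos (by omega), hc,
      Int.mul_ediv_cancel_left c (by omega : i ≠ 0)]
  have hci : c = i := by omega
  have hphi' : phi = i * i := by rw [hc, hci]
  constructor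
  · unfold Dv
    have hpi : pvDivP phi i = true := by
      simp only [pvDivP, beq_iff_eq]
      exact (PySem.Int.mod_eq_zero_iff_dvd phi i).2 ⟨i, hphi'⟩
    rw [heq, PySem.List.pyRange_one_singleton, List.filter_cons_of_pos hpi, List.filter_nil]
  · exact Dv_stop phi (i + 1) (by omega) (by nlinarith)

theorem divLoopB_eq (phi i : Int) (small large : List Int) :
    1 ≤ i →
    (divLoopB phi i small large).1 ++ ((divLoopB phi i small large).2).reverse
      = small ++ Dv phi i ++ large.reverse := by
  induction i, small, large using divLoopB.induct (phi := phi) with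
  | case1 i small large h hm hne ih =>
      intro hi
      rw [divLoopB]
      simp only [dif_pos h, if_pos hm, if_pos hne]
      rw [ih (by omega), Dv_step_dvd_ne phi i hi h ((PySem.Int.mod_eq_zero_iff_dvd phi i).1 hm) hne]
      simp [List.append_assoc]
  | case2 i small large h hm hne ih =>
      intro hi
      rw [divLoopB]
      simp only [dif_pos h, if_pos hm, if_neg hne]
      obtain ⟨h1, h2⟩ := Dv_step_dvd_eq phi i hi h ((PySem.Int.mod_eq_zero_iff_dvd phi i).1 hm)
        (not_ne_iff.mp hne)
      rw [ih (by omega), h1, h2]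
      simp
  | case3 i small large h hm ih =>
      intro hi
      rw [divLoopB]
      simp only [dif_pos h, if_neg hm]
      rw [ih (by omega), Dv_step_ndvd phi i hi h
        (fun hd => hm ((PySem.Int.mod_eq_zero_iff_dvd phi i).2 hd))]
  | case4 i small large h =>
      intro hi
      rw [divLoopB]
      simp only [dif_neg h]
      rw [Dv_stop phi i (by omega) (by omega)]
      simp

-- A's second loop is exactly Dv phi 1
theorem kZahlen_eq (phi : Int) :
    (PySem.List.pyRange 0 phi 1).foldl
      (fun acc i => if PySem.Int.mod phi (i + 1) = 0 then acc ++ [i + 1] else acc) []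
      = Dv phi 1 := by
  have hfun : (fun (acc : List Int) i => if PySem.Int.mod phi (i + 1) = 0 then acc ++ [i + 1] else acc)
      = (fun acc x => if (fun i => pvDivP phi (i + 1)) x = true then acc ++ [(fun i => i + 1) x] else acc) := by
    funext acc i
    simp only [pvDivP, beq_iff_eq]
  rw [hfun, PySem.List.foldl_append_if (fun i => pvDivP phi (i + 1)) (fun i => i + 1)]
  have hcomp : (fun i => pvDivP phi (i + 1)) = (pvDivP phi ∘ (fun i => i + 1)) := rfl
  rw [hcomp, List.nil_append, ← List.filter_map]
  have hshift : (PySem.List.pyRange 0 phi 1).map (fun i => i + 1) = PySem.List.pyRange 1 (phi + 1) 1 := by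
    rw [PySem.List.pyRange_one 0 phi, PySem.List.pyRange_one 1 (phi + 1), List.map_map]
    have h0 : phi + 1 - 1 = phi - 0 := by ring
    rw [h0]
    refine List.map_congr_left ?_
    intro a _
    simp only [Function.comp]
    omega
  rw [hshift]
  unfold Dv
  have : PySem.Int.floordiv phi 1 = phi := by
    rw [PySem.Int.floordiv_eq_ediv_of_pos one_pos, Int.ediv_one]
  rw [this]

-- A's first loop is B's filter
theorem phiZahlen_eq (z : Int) :
    (PySem.List.pyRange 0 z 1).foldl
      (fun acc i => if ggtA i z = 1 then acc ++ [i] else acc) []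
      = (PySem.List.pyRange 0 z 1).filter (fun i => ggtB i z == 1) := by
  have hfun : (fun (acc : List Int) i => if ggtA i z = 1 then acc ++ [i] else acc)
      = (fun acc x => if (fun i => ggtB i z == 1) x = true then acc ++ [id x] else acc) := by
    funext acc i
    simp only [id, beq_iff_eq, ggt_eq]
  rw [hfun, PySem.List.foldl_append_if (fun i => ggtB i z == 1) id, List.map_id, List.nil_append]

-- ===== VERDICT (by name: the statement is the Claim_ definition above) =====
theorem kRechnen_spec : Claim_equal_kRechnen := by
  intro z phi _
  unfold Spec_kRechnen kRechnen kRechnen_alt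
  refine Prod.ext ?_ ?_
  · exact phiZahlen_eq z
  · have := divLoopB_eq phi 1 [] [] le_rfl
    simp only [List.nil_append, List.reverse_nil, List.append_nil] at this
    simpa [kZahlen_eq phi] using this.symm
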